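-- pv_equiv track=rewrite | github.com/vibha-exl/deduplication2 | ReleaseHeldGoods (2).py | get_result_priority
-- ===== SOURCE A (Python) =====
-- priority = ["Red Error", "Amber Error", "Compliant with development"]
--
-- def get_result_priority(row):
--     vals = [v for v in row if v!= "N.A."]
--     if len(vals) == 0:
--         return "N.A."
--     for p in priority:
--         if p in vals:
--             return p
--     return "Good Customer Outcome"
-- ===== SOURCE B (Python) =====
-- priority = ["Red Error", "Amber Error", "Compliant with development"]
--
-- _rank = {p: i for i, p in enumerate(priority)}
--
-- def get_result_priority(row):
--     saw_value = False
--     best = None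
--     for v in row:
--         if v == "N.A.":
--             continue
--         saw_value = True
--         r = _rank.get(v)
--         if r is not None and (best is None or r < best):
--             best = r
--     if not saw_value:
--         return "N.A."
--     if best is None:
--         return "Good Customer Outcome"
--     return priority[best]
-- ===== Notes on version B (the rewrite author's own statement) =====
-- stated objective: alternative
-- what changed: Single pass over row keeping the minimum priority rank (via a precomputed rank dict) and a saw-non-NA flag, instead of building a filtered list and scanning it once per priority entry.
import Mathlib
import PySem

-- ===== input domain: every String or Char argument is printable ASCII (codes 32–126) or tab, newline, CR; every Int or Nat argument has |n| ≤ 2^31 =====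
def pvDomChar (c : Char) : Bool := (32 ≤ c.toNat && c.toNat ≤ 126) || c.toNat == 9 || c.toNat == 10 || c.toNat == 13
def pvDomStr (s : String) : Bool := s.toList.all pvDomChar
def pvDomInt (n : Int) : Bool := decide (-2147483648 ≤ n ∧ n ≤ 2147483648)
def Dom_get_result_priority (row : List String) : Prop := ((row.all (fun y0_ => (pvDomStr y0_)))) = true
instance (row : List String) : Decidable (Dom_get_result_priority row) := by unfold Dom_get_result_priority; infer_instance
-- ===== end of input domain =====

-- B replaces A's filtered list plus one membership scan per priority entry by a single
-- pass over the row keeping the minimum priority rank (via a rank dict) and a flag.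

-- ===== PORT A =====
def priorityList : List String := ["Red Error", "Amber Error", "Compliant with development"]

-- 'for p in priority: if p in vals: return p' with final 'return "Good Customer Outcome"'
def aLoop : List String → List String → String
  | [], _ => "Good Customer Outcome"
  | p :: ps, vals => if vals.contains p then p else aLoop ps vals

def get_result_priority (row : List String) : String :=
  let vals := row.filter (fun v => v != "N.A.")
  if vals.length == 0 then "N.A."
  else aLoop priorityList vals

-- ===== PORT B =====
-- _rank = {p: i for i, p in enumerate(priority)}
def rankDict : PySem.Dict String Int :=
  PySem.Dict.ofList [("Red Error", 0), ("Amber Error", 1), ("Compliant with development", 2)]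

-- the for-loop of B: state (saw_value, best)
def bLoop : List String → Bool → Option Int → Bool × Option Int
  | [], saw, best => (saw, best)
  | v :: rest, saw, best =>
    if v == "N.A." then bLoop rest saw best
    else
      let r := rankDict.get? v
      let best' := match r with
        | some r => match best with
          | some b => if r < b then some r else some b
          | none => some r
        | none => best
      bLoop rest true best'

def get_result_priority_alt (row : List String) : String :=
  let (saw, best) := bLoop row false none
  if !saw then "N.A."
  else match best with
    | none => "Good Customer Outcome"
    | some b => (PySem.List.pyGet? priorityList b).getD ""   -- priority[best]; best is always in range

-- ===== PRECONDITION & SPEC =====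
def Spec_get_result_priority (row : List String) (out : String) : Prop := out = get_result_priority_alt row
instance (row : List String) (out : String) : Decidable (Spec_get_result_priority row out) := by unfold Spec_get_result_priority; infer_instance

-- ===== CLAIM (what is proved, stated in full; the proofs are below) =====
def Claim_equal_get_result_priority : Prop := ∀ (row : List String), Dom_get_result_priority row → Spec_get_result_priority row (get_result_priority row)

-- ===== LEMMAS AND PROOFS =====

-- minimum of two optional ranks
def optMin : Option Int → Option Int → Option Int
  | none, y => y
  | some x, none => some x
  | some x, some y => some (min x y)

-- the best rank reachable from a row (recursive characterisation of bLoop's second component)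
def bestOf : List String → Option Int
  | [] => none
  | v :: rest => if v = "N.A." then bestOf rest else optMin (rankDict.get? v) (bestOf rest)

lemma optMin_assoc (a b c : Option Int) : optMin (optMin a b) c = optMin a (optMin b c) := by
  cases a <;> cases b <;> cases c <;> simp [optMin, min_assoc]

lemma bLoop_spec (row : List String) (saw : Bool) (best : Option Int) :
    bLoop row saw best = (saw || row.any (fun v => v != "N.A."), optMin best (bestOf row)) := by
  induction row generalizing saw best with
  | nil => cases best <;> simp [bLoop, bestOf, optMin]
  | cons v rest ih =>
    by_cases hv : v = "N.A."
    · simp [bLoop, bestOf, hv, ih]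
    · have hvb : (v == "N.A.") = false := by simp [hv]
      rw [bLoop, hvb]
      simp only [Bool.false_eq_true, if_false, ih, bestOf, if_neg hv, List.any_cons,
        Prod.mk.injEq]
      refine ⟨by simp [hv], ?_⟩
      rw [← optMin_assoc]
      congr 1
      cases best <;> cases rankDict.get? v <;> simp only [optMin] <;>
        (try rfl) <;> rw [min_def] <;> split_ifs <;> (try rfl) <;>
        (simp only [Option.some.injEq]; omega)

lemma rank_eq (v : String) : rankDict.get? v =
    if v = "Red Error" then some 0 else if v = "Amber Error" then some 1
    else if v = "Compliant with development" then some 2 else none := by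
  have hmk : rankDict = ((PySem.Dict.empty.insert "Red Error" (0 : Int)).insert
      "Amber Error" 1).insert "Compliant with development" 2 := by decide
  rw [hmk, PySem.Dict.get?_insert, PySem.Dict.get?_insert, PySem.Dict.get?_insert,
    PySem.Dict.get?_empty]
  by_cases h1 : v = "Red Error" <;> by_cases h2 : v = "Amber Error" <;>
    by_cases h3 : v = "Compliant with development" <;> simp_all

lemma bestOf_eq (row : List String) : bestOf row =
    if "Red Error" ∈ row then some 0
    else if "Amber Error" ∈ row then some 1
    else if "Compliant with development" ∈ row then some 2
    else none := by
  induction row with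
  | nil => simp [bestOf]
  | cons v rest ih =>
    simp only [bestOf, ih, rank_eq, List.mem_cons]
    by_cases hv : v = "N.A." <;>
      by_cases h1 : v = "Red Error" <;> by_cases h2 : v = "Amber Error" <;>
      by_cases h3 : v = "Compliant with development" <;>
      split_ifs <;> simp_all [optMin] <;> omega

lemma mem_filter_row (p : String) (hp : p ≠ "N.A.") (row : List String) :
    p ∈ row.filter (fun v => v != "N.A.") ↔ p ∈ row := by
  simp [List.mem_filter, hp]

-- ===== VERDICT (by name: the statement is the Claim_ definition above) =====
theorem get_result_priority_spec : Claim_equal_get_result_priority := by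
  intro row _
  unfold Spec_get_result_priority
  unfold get_result_priority get_result_priority_alt
  rw [bLoop_spec]
  simp only [optMin]
  by_cases hempty : row.filter (fun v => v != "N.A.") = []
  · have hany : row.any (fun v => v != "N.A.") = false := by
      have h := List.filter_eq_nil_iff.mp hempty
      simp only [List.any_eq_false]
      intro x hx; simpa using h x hx
    simp [hempty, hany]
  · have hany : row.any (fun v => v != "N.A.") = true := by
      rw [List.any_eq_true]
      rcases List.exists_mem_of_ne_nil _ hempty with ⟨x, hx⟩
      have := List.mem_filter.mp hx
      exact ⟨x, this.1, this.2⟩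
    have hlen : (List.length (row.filter (fun v => v != "N.A.")) == 0) = false := by
      simp [List.length_eq_zero_iff, hempty]
    simp only [hempty, hlen, hany, Bool.false_or, if_false, Bool.not_true, Bool.false_eq_true]
    rw [bestOf_eq]
    by_cases h1 : "Red Error" ∈ row <;> by_cases h2 : "Amber Error" ∈ row <;>
      by_cases h3 : "Compliant with development" ∈ row <;>
      simp [aLoop, priorityList, List.contains_eq_mem,
        mem_filter_row "Red Error" (by decide) row,
        mem_filter_row "Amber Error" (by decide) row,
        mem_filter_row "Compliant with development" (by decide) row,
        h1, h2, h3, PySem.List.pyGet?, PySem.List.pyIdx?]
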